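-- pv_equiv track=rewrite | github.com/4444J99/agentic-titan | agents/archetypes/product_manager.py | _parse_milestones
-- ===== SOURCE A (Python) =====
-- from typing import Any
--
-- def _parse_milestones(content: str) -> list[dict[str, Any]]:
--     """Parse milestones from LLM response."""
--     milestones = []
--     current: dict[str, Any] = {}
--
--     for line in content.split("\n"):
--         line = line.strip()
--
--         if line.startswith("MILESTONE:"):
--             if current:
--                 milestones.append(current)
--             current = {"name": line.replace("MILESTONE:", "").strip()}
--         elif line.startswith("DATE:") and current:
--             current["date"] = line.replace("DATE:", "").strip()
--         elif line.startswith("FEATURES:") and current: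
--             current["features"] = line.replace("FEATURES:", "").strip()
--         elif line.startswith("SUCCESS_CRITERIA:") and current:
--             current["criteria"] = line.replace("SUCCESS_CRITERIA:", "").strip()
--
--     if current:
--         milestones.append(current)
--
--     return milestones
-- ===== SOURCE B (Python) =====
-- def _parse_milestones(content: str) -> list[dict]:
--     """Parse milestones: group stripped lines into blocks at MILESTONE: markers, then map each block to a dict."""
--     lines = [ln.strip() for ln in content.split("\n")]
--     blocks: list[list[str]] = []
--     for line in lines:
--         if line.startswith("MILESTONE:"):
--             blocks.append([line])
--         elif blocks:
--             blocks[-1].append(line)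
--
--     def to_dict(block: list[str]) -> dict:
--         d = {"name": block[0].replace("MILESTONE:", "").strip()}
--         for line in block[1:]:
--             if line.startswith("DATE:"):
--                 d["date"] = line.replace("DATE:", "").strip()
--             elif line.startswith("FEATURES:"):
--                 d["features"] = line.replace("FEATURES:", "").strip()
--             elif line.startswith("SUCCESS_CRITERIA:"):
--                 d["criteria"] = line.replace("SUCCESS_CRITERIA:", "").strip()
--         return d
--
--     return [to_dict(b) for b in blocks]
-- ===== Notes on version B (the rewrite author's own statement) =====
-- stated objective: alternative
-- what changed: Replaces A's single stateful accumulator loop (current dict mutated and flushed in place) by a two-phase decomposition: first group the stripped lines into blocks starting at each MILESTONE: marker, then map each block independently to its dict.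
import Mathlib
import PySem

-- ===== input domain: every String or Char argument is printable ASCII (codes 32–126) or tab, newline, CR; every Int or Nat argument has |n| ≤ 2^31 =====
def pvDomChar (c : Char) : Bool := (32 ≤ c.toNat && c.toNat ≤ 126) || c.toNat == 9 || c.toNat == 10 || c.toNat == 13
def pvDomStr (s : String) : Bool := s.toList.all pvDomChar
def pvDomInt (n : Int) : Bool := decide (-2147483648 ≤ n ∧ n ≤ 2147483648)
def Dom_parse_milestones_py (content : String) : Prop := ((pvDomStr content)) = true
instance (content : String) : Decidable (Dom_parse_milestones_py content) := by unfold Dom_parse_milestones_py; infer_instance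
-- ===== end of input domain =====

-- B replaces A's single stateful accumulator loop by a two-phase decomposition (group lines into
-- MILESTONE blocks, then map each block to its dict); alternative structure, same cost.

-- ===== PORT A =====
-- A's loop body after `line = line.strip()` (the strip is applied in pyA_step below).
def pyA_core (st : List (PySem.Dict String String) × PySem.Dict String String) (line : String) :
    List (PySem.Dict String String) × PySem.Dict String String :=
  if PySem.Str.startswith line "MILESTONE:" then
    ((if st.2.items = [] then st.1 else st.1 ++ [st.2]),
     PySem.Dict.empty.insert "name" (PySem.Str.strip (PySem.Str.replace line "MILESTONE:" "")))
  else if PySem.Str.startswith line "DATE:" = true ∧ st.2.items ≠ [] then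
    (st.1, st.2.insert "date" (PySem.Str.strip (PySem.Str.replace line "DATE:" "")))
  else if PySem.Str.startswith line "FEATURES:" = true ∧ st.2.items ≠ [] then
    (st.1, st.2.insert "features" (PySem.Str.strip (PySem.Str.replace line "FEATURES:" "")))
  else if PySem.Str.startswith line "SUCCESS_CRITERIA:" = true ∧ st.2.items ≠ [] then
    (st.1, st.2.insert "criteria" (PySem.Str.strip (PySem.Str.replace line "SUCCESS_CRITERIA:" "")))
  else st

def pyA_step (st : List (PySem.Dict String String) × PySem.Dict String String) (rawline : String) :
    List (PySem.Dict String String) × PySem.Dict String String :=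
  pyA_core st (PySem.Str.strip rawline)

def parse_milestones_py (content : String) : List (List (String × String)) :=
  match ((PySem.Str.split? content "\n").getD []).foldl pyA_step ([], PySem.Dict.empty) with
  | (milestones, current) =>
      (if current.items = [] then milestones else milestones ++ [current]).map PySem.Dict.items

-- ===== PORT B =====
-- the inner elif chain of Source B's to_dict, for one non-first line of a block
def pyB_applyField (d : PySem.Dict String String) (line : String) : PySem.Dict String String :=
  if PySem.Str.startswith line "DATE:" then
    d.insert "date" (PySem.Str.strip (PySem.Str.replace line "DATE:" ""))
  else if PySem.Str.startswith line "FEATURES:" then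
    d.insert "features" (PySem.Str.strip (PySem.Str.replace line "FEATURES:" ""))
  else if PySem.Str.startswith line "SUCCESS_CRITERIA:" then
    d.insert "criteria" (PySem.Str.strip (PySem.Str.replace line "SUCCESS_CRITERIA:" ""))
  else d

-- Source B's to_dict (blocks are always nonempty; [] is unreachable)
def pyB_toDict (block : List String) : PySem.Dict String String :=
  match block with
  | [] => PySem.Dict.empty
  | first :: rest =>
      rest.foldl pyB_applyField
        (PySem.Dict.empty.insert "name" (PySem.Str.strip (PySem.Str.replace first "MILESTONE:" "")))

-- blocks[-1].append(line)
def pyB_appendLast (bs : List (List String)) (line : String) : List (List String) :=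
  match bs with
  | [] => []
  | [b] => [b ++ [line]]
  | b :: rest => b :: pyB_appendLast rest line

-- one step of Source B's grouping loop
def pyB_group (bs : List (List String)) (line : String) : List (List String) :=
  if PySem.Str.startswith line "MILESTONE:" then bs ++ [[line]]
  else if bs = [] then bs
  else pyB_appendLast bs line

def parse_milestones_py_alt (content : String) : List (List (String × String)) :=
  (((((PySem.Str.split? content "\n").getD []).map PySem.Str.strip).foldl pyB_group []).map
    (fun b => (pyB_toDict b).items))

-- ===== PRECONDITION & SPEC =====
def Spec_parse_milestones_py (content : String) (out : List (List (String × String))) : Prop := out = parse_milestones_py_alt content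
instance (content : String) (out : List (List (String × String))) : Decidable (Spec_parse_milestones_py content out) := by unfold Spec_parse_milestones_py; infer_instance

-- ===== CLAIM (what is proved, stated in full; the proofs are below) =====
def Claim_equal_parse_milestones_py : Prop := ∀ (content : String), Dom_parse_milestones_py content → Spec_parse_milestones_py content (parse_milestones_py content)

-- ===== LEMMAS AND PROOFS =====

-- A's milestones list only grows: the fold from (ms, cur) is the fold from ([], cur) prefixed by ms.
theorem pyA_foldl_shift (ls : List String) (ms : List (PySem.Dict String String))
    (cur : PySem.Dict String String) :
    ls.foldl pyA_core (ms, cur) =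
      (ms ++ (ls.foldl pyA_core ([], cur)).1, (ls.foldl pyA_core ([], cur)).2) := by
  induction ls generalizing ms cur with
  | nil => simp
  | cons l ls ih =>
    simp only [List.foldl_cons]
    have hstep : pyA_core (ms, cur) l =
        (ms ++ (pyA_core ([], cur) l).1, (pyA_core ([], cur) l).2) := by
      unfold pyA_core; split_ifs <;> simp
    rw [hstep, ih, ih ((pyA_core ([], cur) l).1)]
    simp [List.append_assoc]

theorem pyB_appendLast_cons (b : List String) (rest : List (List String)) (l : String)
    (h : rest ≠ []) : pyB_appendLast (b :: rest) l = b :: pyB_appendLast rest l := by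
  cases rest with
  | nil => exact absurd rfl h
  | cons x xs => rfl

theorem pyB_appendLast_append (bs0 bs1 : List (List String)) (l : String) (h : bs1 ≠ []) :
    pyB_appendLast (bs0 ++ bs1) l = bs0 ++ pyB_appendLast bs1 l := by
  induction bs0 with
  | nil => rfl
  | cons b bs ih =>
    rw [List.cons_append, pyB_appendLast_cons b (bs ++ bs1) l (by simp [h]), ih, List.cons_append]

theorem pyB_appendLast_ne_nil (bs : List (List String)) (l : String) (h : bs ≠ []) :
    pyB_appendLast bs l ≠ [] := by
  cases bs with
  | nil => exact absurd rfl h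
  | cons b rest => cases rest <;> simp [pyB_appendLast]

theorem pyB_group_ne_nil (bs : List (List String)) (l : String) (h : bs ≠ []) :
    pyB_group bs l ≠ [] := by
  unfold pyB_group
  split_ifs with h1
  · simp
  · exact pyB_appendLast_ne_nil bs l h

-- B's grouping loop never touches blocks before the last: fold from bs0 ++ bs1 (bs1 ≠ []) keeps bs0.
theorem pyB_foldl_shift (ls : List String) (bs0 bs1 : List (List String)) (h : bs1 ≠ []) :
    ls.foldl pyB_group (bs0 ++ bs1) = bs0 ++ ls.foldl pyB_group bs1 := by
  induction ls generalizing bs1 with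
  | nil => rfl
  | cons l ls ih =>
    simp only [List.foldl_cons]
    have hstep : pyB_group (bs0 ++ bs1) l = bs0 ++ pyB_group bs1 l := by
      unfold pyB_group
      split_ifs with h1 h2
      · simp
      · exact absurd (List.append_eq_nil_iff.mp h2).2 h
      · exact pyB_appendLast_append bs0 bs1 l h
    rw [hstep, ih _ (pyB_group_ne_nil bs1 l h)]

theorem insert_items_ne_nil (d : PySem.Dict String String) (k v : String) :
    (d.insert k v).items ≠ [] := by
  rw [PySem.Dict.items_insert]
  split_ifs with h
  · intro hc
    simp only [List.map_eq_nil_iff] at hc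
    rw [PySem.Dict.contains_iff_mem_keys] at h
    simp [PySem.Dict.keys, hc] at h
  · simp

theorem pyB_applyField_items_ne_nil (d : PySem.Dict String String) (l : String)
    (h : d.items ≠ []) : (pyB_applyField d l).items ≠ [] := by
  unfold pyB_applyField
  split_ifs <;> first | exact insert_items_ne_nil _ _ _ | exact h

theorem foldl_applyField_items_ne_nil (rest : List String) (d : PySem.Dict String String)
    (h : d.items ≠ []) : (rest.foldl pyB_applyField d).items ≠ [] := by
  induction rest generalizing d with
  | nil => exact h
  | cons l ls ih => exact ih _ (pyB_applyField_items_ne_nil d l h)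

theorem pyB_toDict_items_ne_nil (b : List String) (h : b ≠ []) :
    (pyB_toDict b).items ≠ [] := by
  cases b with
  | nil => exact absurd rfl h
  | cons first rest =>
    exact foldl_applyField_items_ne_nil rest _ (insert_items_ne_nil _ _ _)

-- appending a non-marker line to a block composes with toDict
theorem pyB_toDict_snoc (b : List String) (l : String) (h : b ≠ []) :
    pyB_toDict (b ++ [l]) = pyB_applyField (pyB_toDict b) l := by
  cases b with
  | nil => exact absurd rfl h
  | cons first rest => simp [pyB_toDict, List.foldl_append]

def pyFinalize (st : List (PySem.Dict String String) × PySem.Dict String String) :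
    List (PySem.Dict String String) :=
  if st.2.items = [] then st.1 else st.1 ++ [st.2]

-- core invariant: A's loop, started inside the block b, agrees with B's remaining grouping
theorem pv_main_inside (ls : List String) (b : List String) (hb : b ≠ []) :
    pyFinalize (ls.foldl pyA_core ([], pyB_toDict b)) =
      (ls.foldl pyB_group [b]).map pyB_toDict := by
  induction ls generalizing b with
  | nil => simp [pyFinalize, pyB_toDict_items_ne_nil b hb]
  | cons l ls ih =>
    simp only [List.foldl_cons]
    by_cases hm : PySem.Str.startswith l "MILESTONE:" = true
    · have hA : pyA_core ([], pyB_toDict b) l = ([pyB_toDict b], pyB_toDict [l]) := by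
        unfold pyA_core
        rw [if_pos hm, if_neg (pyB_toDict_items_ne_nil b hb)]
        simp [pyB_toDict]
      have hB : pyB_group [b] l = [b] ++ [[l]] := by
        unfold pyB_group; rw [if_pos hm]
      rw [hA, hB]
      rw [pyA_foldl_shift ls [pyB_toDict b] (pyB_toDict [l])]
      rw [pyB_foldl_shift ls [b] [[l]] (by simp)]
      have hih := ih [l] (by simp)
      unfold pyFinalize at hih ⊢
      split_ifs at hih ⊢ with h1 <;> simp_all
    · have hne := pyB_toDict_items_ne_nil b hb
      have hA : pyA_core ([], pyB_toDict b) l = ([], pyB_applyField (pyB_toDict b) l) := by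
        unfold pyA_core pyB_applyField
        rw [if_neg (by simpa using hm)]
        split_ifs with h1 h2 h3 <;> simp_all
      have hB : pyB_group [b] l = [b ++ [l]] := by
        unfold pyB_group
        rw [if_neg (by simpa using hm)]
        simp [pyB_appendLast]
      rw [hA, hB, ← pyB_toDict_snoc b l hb]
      exact ih (b ++ [l]) (by simp)

theorem pv_main_empty (ls : List String) :
    pyFinalize (ls.foldl pyA_core ([], PySem.Dict.empty)) =
      (ls.foldl pyB_group []).map pyB_toDict := by
  induction ls with
  | nil => simp [pyFinalize, PySem.Dict.empty]
  | cons l ls ih =>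
    simp only [List.foldl_cons]
    by_cases hm : PySem.Str.startswith l "MILESTONE:" = true
    · have hA : pyA_core ([], PySem.Dict.empty) l = ([], pyB_toDict [l]) := by
        unfold pyA_core
        rw [if_pos hm]
        simp [PySem.Dict.empty, pyB_toDict]
      have hB : pyB_group [] l = [[l]] := by
        unfold pyB_group; rw [if_pos hm]; rfl
      rw [hA, hB]
      exact pv_main_inside ls [l] (by simp)
    · have hA : pyA_core ([], PySem.Dict.empty) l = ([], PySem.Dict.empty) := by
        unfold pyA_core
        rw [if_neg (by simpa using hm)]
        split_ifs <;> simp_all [PySem.Dict.empty]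
      have hB : pyB_group [] l = [] := by
        unfold pyB_group
        rw [if_neg (by simpa using hm)]
        rfl
      rw [hA, hB]
      exact ih

-- ===== VERDICT (by name: the statement is the Claim_ definition above) =====
theorem parse_milestones_py_spec : Claim_equal_parse_milestones_py := by
  intro content _
  unfold Spec_parse_milestones_py parse_milestones_py parse_milestones_py_alt
  have h1 : ((PySem.Str.split? content "\n").getD []).foldl pyA_step ([], PySem.Dict.empty)
      = (((PySem.Str.split? content "\n").getD []).map PySem.Str.strip).foldl pyA_core
          ([], PySem.Dict.empty) := by
    rw [List.foldl_map]; rfl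
  rw [h1]
  have h2 := pv_main_empty (((PySem.Str.split? content "\n").getD []).map PySem.Str.strip)
  unfold pyFinalize at h2
  generalize hP : (((PySem.Str.split? content "\n").getD []).map PySem.Str.strip).foldl pyA_core
      ([], PySem.Dict.empty) = P at *
  obtain ⟨ms, cur⟩ := P
  simp only [] at h2 ⊢
  rw [h2, List.map_map]
  rfl
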